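-- pv_equiv track=rewrite | github.com/epam/atap-backend | framework/tests/tables/test_text_table.py | number_of_whitespace_symbols
-- ===== SOURCE A (Python) =====
-- from string import whitespace
--
-- def number_of_whitespace_symbols(line):
--     counter = 0
--     len_ = 0
--     for ch in line:
--         if ch in whitespace:
--             len_ += 1
--         elif len_:
--             if len_ > 1:
--                 counter += 1
--             len_ = 0
--     return counter
-- ===== SOURCE B (Python) =====
-- from string import whitespace
--
-- def number_of_whitespace_symbols(line):
--     # Stateless sliding window: a counted run is exactly a position where two
--     # consecutive whitespace chars are immediately followed by a non-whitespace
--     # char (the run's terminator). Count those triples.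
--     return sum(a in whitespace and b in whitespace and c not in whitespace
--                for a, b, c in zip(line, line[1:], line[2:]))
-- ===== Notes on version B (the rewrite author's own statement) =====
-- stated objective: alternative
-- what changed: Replaces the stateful run-length accumulator with a stateless sliding-window count: zip three shifted views of the string and count triples (ws, ws, non-ws), each of which marks exactly one whitespace run of length > 1 that is terminated by a non-whitespace character.
import Mathlib
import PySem

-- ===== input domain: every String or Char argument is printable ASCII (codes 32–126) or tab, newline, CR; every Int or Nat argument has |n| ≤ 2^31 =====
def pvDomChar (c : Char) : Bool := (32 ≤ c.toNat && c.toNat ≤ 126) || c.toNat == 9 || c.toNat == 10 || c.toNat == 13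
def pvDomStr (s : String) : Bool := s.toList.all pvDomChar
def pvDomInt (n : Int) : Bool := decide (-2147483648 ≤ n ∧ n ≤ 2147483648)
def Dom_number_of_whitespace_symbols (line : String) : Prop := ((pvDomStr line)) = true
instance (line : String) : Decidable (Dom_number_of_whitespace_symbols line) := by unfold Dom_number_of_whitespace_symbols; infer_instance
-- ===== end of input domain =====

-- B replaces A's stateful run-length accumulator with a stateless sliding-window count of
-- (ws, ws, non-ws) triples over three shifted views of the string; objective: alternative.

-- ch in string.whitespace, for a single character (exact: whitespace = " \t\n\r\x0b\x0c")
def pvIsWS (c : Char) : Bool :=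
  c == ' ' || c == '\t' || c == '\n' || c == '\r' || c == '\x0b' || c == '\x0c'

-- ===== PORT A =====
def number_of_whitespace_symbols (line : String) : Int :=
  (line.toList.foldl
    (fun (st : Int × Int) ch =>
      if pvIsWS ch then (st.1, st.2 + 1)
      else if st.2 ≠ 0 then ((if st.2 > 1 then st.1 + 1 else st.1), 0)
      else st)
    (0, 0)).1

-- ===== PORT B =====
-- zip(line, line[1:], line[2:]) and count the (ws, ws, non-ws) triples
def number_of_whitespace_symbols_alt (line : String) : Int :=
  (((((line.toList.zip (line.toList.drop 1)).zip (line.toList.drop 2)).countP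
      (fun p => pvIsWS p.1.1 && pvIsWS p.1.2 && !pvIsWS p.2)) : Nat) : Int)

-- ===== PRECONDITION & SPEC =====
def Spec_number_of_whitespace_symbols (line : String) (out : Int) : Prop := out = number_of_whitespace_symbols_alt line
instance (line : String) (out : Int) : Decidable (Spec_number_of_whitespace_symbols line out) := by unfold Spec_number_of_whitespace_symbols; infer_instance

-- ===== CLAIM (what is proved, stated in full; the proofs are below) =====
def Claim_equal_number_of_whitespace_symbols : Prop := ∀ (line : String), Dom_number_of_whitespace_symbols line → Spec_number_of_whitespace_symbols line (number_of_whitespace_symbols line)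

-- ===== LEMMAS AND PROOFS =====

-- proof-only reference function: the count, with k pending whitespace characters before l
def pvCnt (k : Int) : List Char → Int
  | [] => 0
  | c :: t =>
      if pvIsWS c then pvCnt (k + 1) t
      else (if k > 1 then 1 else 0) + pvCnt 0 t

theorem pvFoldA (t : List Char) : ∀ (c k : Int),
    (t.foldl
      (fun (st : Int × Int) ch =>
        if pvIsWS ch then (st.1, st.2 + 1)
        else if st.2 ≠ 0 then ((if st.2 > 1 then st.1 + 1 else st.1), 0)
        else st)
      (c, k)).1 = c + pvCnt k t := by
  induction t with
  | nil => intro c k; simp [pvCnt]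
  | cons ch t ih =>
      intro c k
      rw [List.foldl_cons]
      by_cases hws : pvIsWS ch = true
      · rw [if_pos hws, ih]
        simp only [pvCnt]
        rw [if_pos hws]
      · rw [if_neg hws]
        by_cases hk0 : k = (0 : Int)
        · rw [if_neg (not_not_intro hk0), ih]
          simp only [pvCnt]
          rw [if_neg hws, if_neg (by omega : ¬ k > 1), hk0]
          ring
        · rw [if_pos hk0, ih]
          simp only [pvCnt]
          rw [if_neg hws]
          by_cases hk : k > 1
          · rw [if_pos hk, if_pos hk]; ring
          · rw [if_neg hk, if_neg hk]; ring

-- proof-only reference: the triple count, consuming the list one char at a time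
def pvTrip : List Char → Int
  | a :: b :: c :: t =>
      (if pvIsWS a && pvIsWS b && !pvIsWS c then 1 else 0) + pvTrip (b :: c :: t)
  | _ => 0

-- pending count beyond 1 behaves like 2
theorem pvCnt_ge_two (t : List Char) : ∀ (k : Int), k ≥ 2 → pvCnt k t = pvCnt 2 t := by
  induction t with
  | nil => intro k _; rfl
  | cons c t ih =>
      intro k hk
      simp only [pvCnt]
      by_cases hws : pvIsWS c = true
      · rw [if_pos hws, if_pos hws, ih (k + 1) (by omega), ih (2 + 1) (by omega)]
      · rw [if_neg hws, if_neg hws, if_pos (by omega : k > 1), if_pos (by omega : (2 : Int) > 1)]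

def pvPend (a b : Char) : Int :=
  if pvIsWS b then (if pvIsWS a then 2 else 1) else 0

theorem pvTrip_eq_cnt (t : List Char) : ∀ (a b : Char),
    pvTrip (a :: b :: t) = pvCnt (pvPend a b) t := by
  induction t with
  | nil => intro a b; simp [pvTrip, pvCnt]
  | cons c t ih =>
      intro a b
      have hstep : pvTrip (a :: b :: c :: t)
          = (if pvIsWS a && pvIsWS b && !pvIsWS c then 1 else 0) + pvTrip (b :: c :: t) := rfl
      rw [hstep, ih b c]
      simp only [pvCnt, pvPend]
      by_cases hc : pvIsWS c = true
      · rw [if_pos hc]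
        by_cases hb : pvIsWS b = true
        · rw [if_pos hb]
          by_cases ha : pvIsWS a = true
          · norm_num [ha, hb, hc]
            rw [pvCnt_ge_two t 3 (by omega)]
          · simp only [ha, hb, hc]
            norm_num
        · simp only [hb, hc, Bool.false_and, Bool.and_false]
          norm_num
      · have hc' : pvIsWS c = false := by simpa using hc
        rw [if_neg hc]
        by_cases hb : pvIsWS b = true
        · by_cases ha : pvIsWS a = true
          · simp [ha, hb, hc']
          · have ha' : pvIsWS a = false := by simpa using ha
            simp [ha', hb, hc']
        · have hb' : pvIsWS b = false := by simpa using hb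
          simp [hb', hc']

theorem pvZip_eq_trip (l : List Char) :
    ((((l.zip (l.drop 1)).zip (l.drop 2)).countP
        (fun p => pvIsWS p.1.1 && pvIsWS p.1.2 && !pvIsWS p.2) : Nat) : Int) = pvTrip l := by
  match l with
  | [] => simp [pvTrip]
  | [a] => simp [pvTrip]
  | [a, b] => simp [pvTrip]
  | a :: b :: c :: t =>
      have hstep : pvTrip (a :: b :: c :: t)
          = (if pvIsWS a && pvIsWS b && !pvIsWS c then 1 else 0) + pvTrip (b :: c :: t) := rfl
      rw [hstep, ← pvZip_eq_trip (b :: c :: t)]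
      simp only [List.drop, List.zip_cons_cons, List.countP_cons]
      push_cast
      split_ifs <;> ring

-- unfold pvCnt 0 over the first two characters to pvPend
theorem pvCnt_two_steps (a b : Char) (t : List Char) :
    pvCnt 0 (a :: b :: t) = pvCnt (pvPend a b) t := by
  by_cases ha : pvIsWS a = true <;> by_cases hb : pvIsWS b = true <;>
    simp [pvCnt, pvPend, ha, hb]

-- ===== VERDICT (by name: the statement is the Claim_ definition above) =====
theorem number_of_whitespace_symbols_spec : Claim_equal_number_of_whitespace_symbols := by
  intro line _
  show _ = _
  unfold number_of_whitespace_symbols number_of_whitespace_symbols_alt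
  rw [pvZip_eq_trip, pvFoldA]
  match h : line.toList with
  | [] => simp [pvTrip, pvCnt]
  | [a] =>
      by_cases h : pvIsWS a = true <;> simp [pvTrip, pvCnt, h]
  | a :: b :: t =>
      rw [pvTrip_eq_cnt, pvCnt_two_steps]
      ring
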